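-- pv_equiv track=rewrite | github.com/Denis-Mist/My | vscode/discr/1.py | decode_single
-- ===== SOURCE A (Python) =====
-- def decode_single(encoded_text, cipher):
--     decoded_text = ""
--     current_code = ""
--     for el in encoded_text:
--         current_code += el
--         for char, code in cipher.items():
--             if code == current_code:
--                 decoded_text += char
--                 current_code = ""
--                 break
--     return decoded_text
-- ===== SOURCE B (Python) =====
-- def decode_single(encoded_text, cipher):
--     # Build a prefix trie of the codes (first cipher entry wins per code),
--     # then decode by walking the trie; a missing child means the current
--     # prefix extends no code, so nothing can ever match again and we stop.
--     trie = {}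
--     for char, code in cipher.items():
--         node = trie
--         for c in code:
--             node = node.setdefault(c, {})
--         if None not in node:
--             node[None] = char
--     decoded = []
--     node = trie
--     for el in encoded_text:
--         child = node.get(el)
--         if child is None:
--             break
--         node = child
--         ch = node.get(None)
--         if ch is not None:
--             decoded.append(ch)
--             node = trie
--     return "".join(decoded)
-- ===== Notes on version B (the rewrite author's own statement) =====
-- stated objective: faster
-- what changed: B builds a prefix trie of the codes once and decodes by walking the trie node by node, emitting at terminal nodes and stopping outright when the walk falls off the trie (no further match is then possible), instead of A's rescanning of the whole cipher for every accumulated prefix.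
import Mathlib
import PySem

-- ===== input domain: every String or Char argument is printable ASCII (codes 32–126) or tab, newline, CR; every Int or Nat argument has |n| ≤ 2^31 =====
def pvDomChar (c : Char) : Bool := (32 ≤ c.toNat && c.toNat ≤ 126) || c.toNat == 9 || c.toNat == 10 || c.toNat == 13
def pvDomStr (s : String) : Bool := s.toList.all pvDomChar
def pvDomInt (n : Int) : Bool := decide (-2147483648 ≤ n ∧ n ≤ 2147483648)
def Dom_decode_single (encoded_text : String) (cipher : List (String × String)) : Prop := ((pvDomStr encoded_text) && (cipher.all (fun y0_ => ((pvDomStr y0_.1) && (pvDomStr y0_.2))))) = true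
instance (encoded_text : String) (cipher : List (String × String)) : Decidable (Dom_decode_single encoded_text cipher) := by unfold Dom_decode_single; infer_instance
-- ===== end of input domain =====

-- B builds a prefix trie of the codes once and decodes by walking it (stopping when the
-- walk falls off the trie, where no further match is possible); equal return value proved
-- on all inputs.

-- ===== PORT A =====
-- inner 'for char, code in cipher.items(): if code == current_code: … break' = first-match scan
def decodeScanA : List (String × String) → String → Option String
  | [], _ => none
  | (ch, code) :: rest, cur => if code = cur then some ch else decodeScanA rest cur

def decode_single (encoded_text : String) (cipher : List (String × String)) : String :=
  let d := PySem.Dict.ofList cipher   -- the Python argument is a dict built from these pairs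
  let r := encoded_text.toList.foldl (fun (st : String × String) el =>
      let cur := st.2.push el
      match decodeScanA d.items cur with
      | some ch => (st.1 ++ ch, "")
      | none => (st.1, cur)) ("", "")
  r.1

-- ===== PORT B =====
-- Python B's trie is a nested dict {char: child, None: terminal}; ported as a mutual
-- inductive (children kept in insertion order, as setdefault appends new keys).
mutual
inductive PTrie : Type where
  | node : Option String → PChildren → PTrie
deriving DecidableEq, Repr
inductive PChildren : Type where
  | nil : PChildren
  | cons : Char → PTrie → PChildren → PChildren
deriving DecidableEq, Repr
end

def PTrie.charOf : PTrie → Option String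
  | .node o _ => o

def PTrie.childOf : PTrie → PChildren
  | .node _ ch => ch

-- node.get(el) on the children dict: first (only) matching key
def childGet : PChildren → Char → Option PTrie
  | .nil, _ => none
  | .cons c t rest, el => if c = el then some t else childGet rest el

-- 'node = node.setdefault(c, {})' path descent + 'if None not in node: node[None] = char';
-- childUpd is setdefault on the children dict, building a missing child with the supplied builder
def childUpd : PChildren → Char → (Option PTrie → PTrie) → PChildren
  | .nil, c, f => .cons c (f none) .nil
  | .cons c' t rest, c, f =>
      if c' = c then .cons c' (f (some t)) rest else .cons c' t (childUpd rest c f)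

def trieInsert : PTrie → List Char → String → PTrie
  | .node o ch, [], s => .node (match o with | some v => some v | none => some s) ch
  | .node o ch, c :: cs, s =>
      .node o (childUpd ch c (fun t? => trieInsert (t?.getD (.node none .nil)) cs s))

def buildTrie (items : List (String × String)) : PTrie :=
  items.foldl (fun t p => trieInsert t p.2.toList p.1) (.node none .nil)

-- the decode walk; 'break' on a missing child, reset to the root after emitting
def walkB (root : PTrie) : PTrie → List Char → String → String
  | _, [], acc => acc
  | n, el :: rest, acc =>
      match childGet n.childOf el with
      | none => acc
      | some child =>
          match child.charOf with
          | some s => walkB root root rest (acc ++ s)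
          | none => walkB root child rest acc

def decode_single_alt (encoded_text : String) (cipher : List (String × String)) : String :=
  let root := buildTrie (PySem.Dict.ofList cipher).items
  walkB root root encoded_text.toList ""

-- ===== PRECONDITION & SPEC =====
def Spec_decode_single (encoded_text : String) (cipher : List (String × String)) (out : String) : Prop := out = decode_single_alt encoded_text cipher
instance (encoded_text : String) (cipher : List (String × String)) (out : String) : Decidable (Spec_decode_single encoded_text cipher out) := by unfold Spec_decode_single; infer_instance

-- ===== CLAIM (what is proved, stated in full; the proofs are below) =====
def Claim_equal_decode_single : Prop := ∀ (encoded_text : String) (cipher : List (String × String)), Dom_decode_single encoded_text cipher → Spec_decode_single encoded_text cipher (decode_single encoded_text cipher)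

-- ===== LEMMAS AND PROOFS =====

-- A's loop body, named for the proofs (definitionally the lambda in decode_single)
def stepA (items : List (String × String)) (st : String × String) (el : Char) : String × String :=
  let cur := st.2.push el
  match decodeScanA items cur with
  | some ch => (st.1 ++ ch, "")
  | none => (st.1, cur)

lemma ofList_push (q : List Char) (el : Char) :
    (String.ofList q).push el = String.ofList (q ++ [el]) := by
  apply String.toList_inj.mp; simp

lemma str_eq_ofList_iff (s : String) (p : List Char) :
    (s = String.ofList p) ↔ (p = s.toList) := by
  constructor
  · intro h; subst h; simp
  · intro h; subst h; simp

-- descend along a path of characters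
def nodeAt : PTrie → List Char → Option PTrie
  | t, [] => some t
  | t, c :: p => match childGet t.childOf c with
      | none => none
      | some child => nodeAt child p

def charAt (t : PTrie) (p : List Char) : Option String :=
  match nodeAt t p with
  | none => none
  | some n => n.charOf

lemma nodeAt_append (t : PTrie) (p q : List Char) :
    nodeAt t (p ++ q) = (nodeAt t p).bind (fun m => nodeAt m q) := by
  induction p generalizing t with
  | nil => simp [nodeAt]
  | cons c p ih =>
      simp only [List.cons_append, nodeAt]
      cases childGet t.childOf c <;> simp [ih]

lemma charAt_cons (o : Option String) (ch : PChildren) (e : Char) (p : List Char) :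
    charAt (.node o ch) (e :: p) =
      match childGet ch e with
      | none => none
      | some child => charAt child p := by
  cases h : childGet ch e <;> simp [charAt, nodeAt, PTrie.childOf, h]

lemma charAt_empty (p : List Char) : charAt (.node none .nil) p = none := by
  cases p with
  | nil => simp [charAt, nodeAt, PTrie.charOf]
  | cons c p => simp [charAt, nodeAt, PTrie.childOf, childGet]

-- childUpd updates exactly the 'c' child, leaving the others alone
theorem childGet_childUpd : ∀ (ch : PChildren) (c : Char) (f : Option PTrie → PTrie) (e : Char),
    childGet (childUpd ch c f) e = if e = c then some (f (childGet ch c)) else childGet ch e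
  | .nil, c, f, e => by
      by_cases h : e = c
      · subst h; simp [childUpd, childGet]
      · simp [childUpd, childGet, h, Ne.symm h]
  | .cons c' t rest, c, f, e => by
      have ih := childGet_childUpd rest c f e
      simp only [childUpd]
      by_cases h1 : c' = c
      · subst h1
        by_cases h2 : e = c'
        · subst h2; simp [childGet]
        · simp [childGet, h2, Ne.symm h2]
      · rw [if_neg h1]
        by_cases h2 : e = c'
        · subst h2; simp [childGet, h1]
        · simp [childGet, Ne.symm h2, ih, h1]

-- effect of one insertion on charAt
lemma charAt_trieInsert (t : PTrie) (code : List Char) (s : String) (p : List Char) :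
    charAt (trieInsert t code s) p =
      if p = code then (charAt t p).orElse (fun _ => some s) else charAt t p := by
  induction code generalizing t p with
  | nil =>
      cases t with | node o ch =>
      have hunf : trieInsert (.node o ch) [] s
          = .node (match o with | some v => some v | none => some s) ch := rfl
      cases p with
      | nil =>
          rw [hunf]
          cases o <;> simp [charAt, nodeAt, PTrie.charOf, Option.orElse]
      | cons e p' =>
          rw [hunf, charAt_cons, if_neg (by simp), charAt_cons]
  | cons c cs ih =>
      cases t with | node o ch =>
      have hunf : trieInsert (.node o ch) (c :: cs) s
          = .node o (childUpd ch c (fun t? => trieInsert (t?.getD (.node none .nil)) cs s)) := rfl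
      cases p with
      | nil =>
          rw [hunf, if_neg (by simp)]
          simp [charAt, nodeAt, PTrie.charOf]
      | cons e p' =>
          rw [hunf, charAt_cons, charAt_cons, childGet_childUpd]
          by_cases h : e = c
          · subst h
            rw [if_pos rfl]
            by_cases hp : p' = cs
            · rw [if_pos (by rw [hp])]
              cases childGet ch e with
              | none => simp [ih, hp, charAt_empty]
              | some t0 => simp [ih, hp]
            · rw [if_neg (by simpa using hp)]
              cases childGet ch e with
              | none => simp [ih, hp, charAt_empty]
              | some t0 => simp [ih, hp]
          · rw [if_neg h, if_neg (by simp [h])]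

lemma orElse_orElse_some (x : Option String) (a : String) (y : Unit → Option String) :
    (x.orElse (fun _ => some a)).orElse y = x.orElse (fun _ => some a) := by
  cases x <;> simp [Option.orElse]

lemma charAt_buildTrie_foldl (items : List (String × String)) (t : PTrie) (p : List Char) :
    charAt (items.foldl (fun t q => trieInsert t q.2.toList q.1) t) p =
      (charAt t p).orElse (fun _ => decodeScanA items (String.ofList p)) := by
  induction items generalizing t with
  | nil =>
      simp only [List.foldl_nil, decodeScanA]
      cases charAt t p <;> simp [Option.orElse]
  | cons q rest ih =>
      simp only [List.foldl_cons, ih, charAt_trieInsert, decodeScanA, str_eq_ofList_iff]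
      by_cases h : p = q.2.toList
      · simp only [if_pos h, orElse_orElse_some]
      · simp only [if_neg h]

lemma charAt_buildTrie (items : List (String × String)) (p : List Char) :
    charAt (buildTrie items) p = decodeScanA items (String.ofList p) := by
  unfold buildTrie
  rw [charAt_buildTrie_foldl, charAt_empty]
  simp [Option.orElse]

-- once off the trie, A's loop never matches again
lemma foldA_stuck (items : List (String × String)) (rest : List Char) (acc : String)
    (q : List Char) (h : nodeAt (buildTrie items) q = none) :
    (rest.foldl (stepA items) (acc, String.ofList q)).1 = acc := by
  induction rest generalizing q with
  | nil => simp
  | cons el rest ih =>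
      have h2 : nodeAt (buildTrie items) (q ++ [el]) = none := by
        rw [nodeAt_append, h]; rfl
      have hscan : decodeScanA items (String.ofList (q ++ [el])) = none := by
        rw [← charAt_buildTrie]
        simp [charAt, h2]
      have hstep : stepA items (acc, String.ofList q) el = (acc, String.ofList (q ++ [el])) := by
        simp only [stepA]
        rw [ofList_push, hscan]
      rw [List.foldl_cons, hstep]
      exact ih (q ++ [el]) h2

lemma walk_eq_fold (items : List (String × String)) (rest : List Char) (acc : String)
    (p : List Char) (n : PTrie) (h : nodeAt (buildTrie items) p = some n) :
    (rest.foldl (stepA items) (acc, String.ofList p)).1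
      = walkB (buildTrie items) n rest acc := by
  induction rest generalizing p n acc with
  | nil => simp [walkB]
  | cons el rest ih =>
      have hnode : nodeAt (buildTrie items) (p ++ [el]) = childGet n.childOf el := by
        rw [nodeAt_append, h]
        cases hc : childGet n.childOf el <;> simp [nodeAt, hc]
      have hscan : decodeScanA items (String.ofList (p ++ [el]))
          = charAt (buildTrie items) (p ++ [el]) := by
        rw [charAt_buildTrie]
      rw [List.foldl_cons]
      cases hc : childGet n.childOf el with
      | none =>
          have hca : charAt (buildTrie items) (p ++ [el]) = none := by
            simp [charAt, hnode, hc]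
          have hstep : stepA items (acc, String.ofList p) el
              = (acc, String.ofList (p ++ [el])) := by
            simp only [stepA]
            rw [ofList_push, hscan, hca]
          rw [hstep, walkB]
          simp only [hc]
          exact foldA_stuck items rest acc (p ++ [el]) (by rw [hnode, hc])
      | some child =>
          have hca : charAt (buildTrie items) (p ++ [el]) = child.charOf := by
            simp [charAt, hnode, hc]
          cases hcc : child.charOf with
          | some s =>
              have hstep : stepA items (acc, String.ofList p) el = (acc ++ s, "") := by
                simp only [stepA]
                rw [ofList_push, hscan, hca, hcc]
              rw [hstep, walkB]
              simp only [hc, hcc]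
              have := ih (acc ++ s) [] (buildTrie items) rfl
              simpa using this
          | none =>
              have hstep : stepA items (acc, String.ofList p) el
                  = (acc, String.ofList (p ++ [el])) := by
                simp only [stepA]
                rw [ofList_push, hscan, hca, hcc]
              rw [hstep, walkB]
              simp only [hc, hcc]
              exact ih acc (p ++ [el]) child (by rw [hnode, hc])

-- ===== VERDICT (by name: the statement is the Claim_ definition above) =====
theorem decode_single_spec : Claim_equal_decode_single := by
  intro encoded_text cipher _
  unfold Spec_decode_single decode_single decode_single_alt
  have h := walk_eq_fold (PySem.Dict.ofList cipher).items encoded_text.toList "" []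
      (buildTrie (PySem.Dict.ofList cipher).items) rfl
  simpa using h
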